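-- pv_equiv track=rewrite | github.com/lidclonedux/Cartpro | src/services/transaction_reconciler.py | _count_by_amount_range
-- ===== SOURCE A (Python) =====
-- from typing import List, Dict, Optional, Tuple
--
-- def _count_by_amount_range(transactions: List[Dict]) -> Dict:
--     """Contar transações por faixa de valor"""
--     ranges = {
--         '0-50': 0,
--         '51-200': 0,
--         '201-500': 0,
--         '501-1000': 0,
--         '1001-5000': 0,
--         '5000+': 0
--     }
--
--     for transaction in transactions:
--         amount = transaction.get('amount', 0)
--         if amount <= 50:
--             ranges['0-50'] += 1
--         elif amount <= 200:
--             ranges['51-200'] += 1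
--         elif amount <= 500:
--             ranges['201-500'] += 1
--         elif amount <= 1000:
--             ranges['501-1000'] += 1
--         elif amount <= 5000:
--             ranges['1001-5000'] += 1
--         else:
--             ranges['5000+'] += 1
--
--     return ranges
-- ===== SOURCE B (Python) =====
-- def _count_by_amount_range(transactions):
--     """Contar transações por faixa de valor — staged passes: cumulative counts of
--     amounts <= each threshold, bucket sizes are adjacent differences."""
--     amounts = [t.get('amount', 0) for t in transactions]
--     c1 = sum(1 for a in amounts if a <= 50)
--     c2 = sum(1 for a in amounts if a <= 200)
--     c3 = sum(1 for a in amounts if a <= 500)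
--     c4 = sum(1 for a in amounts if a <= 1000)
--     c5 = sum(1 for a in amounts if a <= 5000)
--     counts = [c1, c2 - c1, c3 - c2, c4 - c3, c5 - c4, len(amounts) - c5]
--     labels = ['0-50', '51-200', '201-500', '501-1000', '1001-5000', '5000+']
--     return dict(zip(labels, counts))
-- ===== Notes on version B (the rewrite author's own statement) =====
-- stated objective: alternative
-- what changed: Replaces A's per-transaction if/elif cascade into dict counters by a staged-pass algorithm: extract the amounts list once, compute one cumulative count per threshold (how many amounts are <= it), and obtain each bucket as the difference of adjacent cumulative counts.
import Mathlib
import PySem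

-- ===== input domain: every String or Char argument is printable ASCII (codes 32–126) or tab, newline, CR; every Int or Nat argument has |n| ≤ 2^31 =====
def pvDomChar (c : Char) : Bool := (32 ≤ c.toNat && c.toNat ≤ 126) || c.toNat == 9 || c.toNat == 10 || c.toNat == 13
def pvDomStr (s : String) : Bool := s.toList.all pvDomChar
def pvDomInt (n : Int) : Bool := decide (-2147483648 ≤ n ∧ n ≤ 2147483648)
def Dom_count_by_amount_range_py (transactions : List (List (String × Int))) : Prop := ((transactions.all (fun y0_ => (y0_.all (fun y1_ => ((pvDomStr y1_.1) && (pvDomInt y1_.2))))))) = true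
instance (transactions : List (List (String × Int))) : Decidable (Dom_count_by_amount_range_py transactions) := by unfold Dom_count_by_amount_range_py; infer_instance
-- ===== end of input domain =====

-- B replaces A's per-item if/elif cascade by staged passes: cumulative counts of amounts ≤ each threshold, buckets as adjacent differences (objective: alternative).

-- shared helper: transaction.get('amount', 0)
def pvAmt (t : List (String × Int)) : Int := (PySem.Dict.mk t).getD "amount" 0

-- ===== PORT A =====
-- one iteration of A's loop body: the if/elif cascade incrementing a dict entry
def pvAStep (r : PySem.Dict String Int) (t : List (String × Int)) : PySem.Dict String Int :=
  let amount := pvAmt t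
  if amount ≤ 50 then r.insert "0-50" (r.getD "0-50" 0 + 1)
  else if amount ≤ 200 then r.insert "51-200" (r.getD "51-200" 0 + 1)
  else if amount ≤ 500 then r.insert "201-500" (r.getD "201-500" 0 + 1)
  else if amount ≤ 1000 then r.insert "501-1000" (r.getD "501-1000" 0 + 1)
  else if amount ≤ 5000 then r.insert "1001-5000" (r.getD "1001-5000" 0 + 1)
  else r.insert "5000+" (r.getD "5000+" 0 + 1)

def count_by_amount_range_py (transactions : List (List (String × Int))) : List (String × Int) :=
  let ranges : PySem.Dict String Int :=
    PySem.Dict.mk [("0-50", 0), ("51-200", 0), ("201-500", 0), ("501-1000", 0), ("1001-5000", 0), ("5000+", 0)]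
  (transactions.foldl pvAStep ranges).items

-- ===== PORT B =====
def count_by_amount_range_py_alt (transactions : List (List (String × Int))) : List (String × Int) :=
  let amounts := transactions.map pvAmt
  let c1 : Int := amounts.countP (fun a => decide (a ≤ 50))
  let c2 : Int := amounts.countP (fun a => decide (a ≤ 200))
  let c3 : Int := amounts.countP (fun a => decide (a ≤ 500))
  let c4 : Int := amounts.countP (fun a => decide (a ≤ 1000))
  let c5 : Int := amounts.countP (fun a => decide (a ≤ 5000))
  let counts : List Int := [c1, c2 - c1, c3 - c2, c4 - c3, c5 - c4, (amounts.length : Int) - c5]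
  let labels : List String := ["0-50", "51-200", "201-500", "501-1000", "1001-5000", "5000+"]
  labels.zip counts

-- ===== PRECONDITION & SPEC =====
def Spec_count_by_amount_range_py (transactions : List (List (String × Int))) (out : List (String × Int)) : Prop := out = count_by_amount_range_py_alt transactions
instance (transactions : List (List (String × Int))) (out : List (String × Int)) : Decidable (Spec_count_by_amount_range_py transactions out) := by unfold Spec_count_by_amount_range_py; infer_instance

-- ===== CLAIM (what is proved, stated in full; the proofs are below) =====
def Claim_equal_count_by_amount_range_py : Prop := ∀ (transactions : List (List (String × Int))), Dom_count_by_amount_range_py transactions → Spec_count_by_amount_range_py transactions (count_by_amount_range_py transactions)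

-- ===== LEMMAS AND PROOFS =====

-- loop invariant for A: after folding, each slot is its start value plus the count
-- of transactions whose amount falls in that range
lemma pv_fold_eq (ts : List (List (String × Int))) : ∀ (a b c d e f : Int),
    (ts.foldl pvAStep (PySem.Dict.mk [("0-50", a), ("51-200", b), ("201-500", c), ("501-1000", d), ("1001-5000", e), ("5000+", f)])).items
      = [("0-50", a + (ts.countP (fun t => decide (pvAmt t ≤ 50)) : Int)),
         ("51-200", b + (ts.countP (fun t => decide (50 < pvAmt t ∧ pvAmt t ≤ 200)) : Int)),
         ("201-500", c + (ts.countP (fun t => decide (200 < pvAmt t ∧ pvAmt t ≤ 500)) : Int)),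
         ("501-1000", d + (ts.countP (fun t => decide (500 < pvAmt t ∧ pvAmt t ≤ 1000)) : Int)),
         ("1001-5000", e + (ts.countP (fun t => decide (1000 < pvAmt t ∧ pvAmt t ≤ 5000)) : Int)),
         ("5000+", f + (ts.countP (fun t => decide (5000 < pvAmt t)) : Int))] := by
  induction ts with
  | nil => intro a b c d e f; simp
  | cons t ts ih =>
    intro a b c d e f
    simp only [List.foldl_cons, List.countP_cons]
    by_cases h1 : pvAmt t ≤ 50
    · rw [show pvAStep (PySem.Dict.mk [("0-50", a), ("51-200", b), ("201-500", c), ("501-1000", d), ("1001-5000", e), ("5000+", f)]) t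
          = PySem.Dict.mk [("0-50", a + 1), ("51-200", b), ("201-500", c), ("501-1000", d), ("1001-5000", e), ("5000+", f)] by
        simp [pvAStep, h1, PySem.Dict.insert, PySem.Dict.getD, PySem.Dict.get?, PySem.Dict.contains], ih]
      simp [h1, show ¬(50 < pvAmt t) by omega]
      all_goals omega
    · by_cases h2 : pvAmt t ≤ 200
      · rw [show pvAStep (PySem.Dict.mk [("0-50", a), ("51-200", b), ("201-500", c), ("501-1000", d), ("1001-5000", e), ("5000+", f)]) t
            = PySem.Dict.mk [("0-50", a), ("51-200", b + 1), ("201-500", c), ("501-1000", d), ("1001-5000", e), ("5000+", f)] by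
          simp [pvAStep, h1, h2, PySem.Dict.insert, PySem.Dict.getD, PySem.Dict.get?, PySem.Dict.contains], ih]
        simp [h1, h2, show 50 < pvAmt t by omega, show ¬(200 < pvAmt t) by omega]
        all_goals omega
      · by_cases h3 : pvAmt t ≤ 500
        · rw [show pvAStep (PySem.Dict.mk [("0-50", a), ("51-200", b), ("201-500", c), ("501-1000", d), ("1001-5000", e), ("5000+", f)]) t
              = PySem.Dict.mk [("0-50", a), ("51-200", b), ("201-500", c + 1), ("501-1000", d), ("1001-5000", e), ("5000+", f)] by
            simp [pvAStep, h1, h2, h3, PySem.Dict.insert, PySem.Dict.getD, PySem.Dict.get?, PySem.Dict.contains], ih]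
          simp [h1, h2, h3, show 200 < pvAmt t by omega, show ¬(500 < pvAmt t) by omega]
          all_goals omega
        · by_cases h4 : pvAmt t ≤ 1000
          · rw [show pvAStep (PySem.Dict.mk [("0-50", a), ("51-200", b), ("201-500", c), ("501-1000", d), ("1001-5000", e), ("5000+", f)]) t
                = PySem.Dict.mk [("0-50", a), ("51-200", b), ("201-500", c), ("501-1000", d + 1), ("1001-5000", e), ("5000+", f)] by
              simp [pvAStep, h1, h2, h3, h4, PySem.Dict.insert, PySem.Dict.getD, PySem.Dict.get?, PySem.Dict.contains], ih]
            simp [h1, h2, h3, h4, show 500 < pvAmt t by omega, show ¬(1000 < pvAmt t) by omega]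
            all_goals omega
          · by_cases h5 : pvAmt t ≤ 5000
            · rw [show pvAStep (PySem.Dict.mk [("0-50", a), ("51-200", b), ("201-500", c), ("501-1000", d), ("1001-5000", e), ("5000+", f)]) t
                  = PySem.Dict.mk [("0-50", a), ("51-200", b), ("201-500", c), ("501-1000", d), ("1001-5000", e + 1), ("5000+", f)] by
                simp [pvAStep, h1, h2, h3, h4, h5, PySem.Dict.insert, PySem.Dict.getD, PySem.Dict.get?, PySem.Dict.contains], ih]
              simp [h1, h2, h3, h4, h5, show 1000 < pvAmt t by omega, show ¬(5000 < pvAmt t) by omega]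
              all_goals omega
            · rw [show pvAStep (PySem.Dict.mk [("0-50", a), ("51-200", b), ("201-500", c), ("501-1000", d), ("1001-5000", e), ("5000+", f)]) t
                  = PySem.Dict.mk [("0-50", a), ("51-200", b), ("201-500", c), ("501-1000", d), ("1001-5000", e), ("5000+", f + 1)] by
                simp [pvAStep, h1, h2, h3, h4, h5, PySem.Dict.insert, PySem.Dict.getD, PySem.Dict.get?, PySem.Dict.contains], ih]
              simp [h1, h2, h3, h4, h5, show 5000 < pvAmt t by omega]
              all_goals omega

-- splitting a cumulative count at a lower threshold
lemma pv_count_split (lo hi : Int) (h : lo ≤ hi) (l : List (List (String × Int))) :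
    l.countP (fun t => decide (pvAmt t ≤ hi)) =
      l.countP (fun t => decide (pvAmt t ≤ lo)) + l.countP (fun t => decide (lo < pvAmt t ∧ pvAmt t ≤ hi)) := by
  induction l with
  | nil => rfl
  | cons x l ih =>
    simp only [List.countP_cons, ih, decide_eq_true_eq]
    split_ifs <;> omega

-- the tail bucket: everything above the last threshold
lemma pv_count_top (hi : Int) (l : List (List (String × Int))) :
    l.countP (fun t => decide (pvAmt t ≤ hi)) + l.countP (fun t => decide (hi < pvAmt t)) = l.length := by
  induction l with
  | nil => rfl
  | cons x l ih =>
    simp only [List.countP_cons, List.length_cons, decide_eq_true_eq]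
    split_ifs <;> omega

-- ===== VERDICT (by name: the statement is the Claim_ definition above) =====
theorem count_by_amount_range_py_spec : Claim_equal_count_by_amount_range_py := by
  intro ts _
  show count_by_amount_range_py ts = count_by_amount_range_py_alt ts
  have s2 := pv_count_split 50 200 (by norm_num) ts
  have s3 := pv_count_split 200 500 (by norm_num) ts
  have s4 := pv_count_split 500 1000 (by norm_num) ts
  have s5 := pv_count_split 1000 5000 (by norm_num) ts
  have s6 := pv_count_top 5000 ts
  unfold count_by_amount_range_py count_by_amount_range_py_alt
  rw [pv_fold_eq ts 0 0 0 0 0 0]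
  simp only [List.countP_map, Function.comp_def, List.length_map, List.zip, List.zipWith,
    List.cons.injEq, Prod.mk.injEq, and_true, true_and]
  refine ⟨?_, ?_, ?_, ?_, ?_, ?_⟩ <;> omega
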